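-- pv_equiv track=rewrite | github.com/ProgramSnail/python_game | proj/main.py | generate_doors
-- ===== SOURCE A (Python) =====
-- import copy
--
-- EMPTY = ' '
--
-- DOOR = '>'
--
-- MARK = '!'
--
-- WALL = '#'
--
-- SIMPLE_COLOR = 1
--
-- DOOR_COLOR = 8
--
-- DIRECTIONS = [
-- 	[0, -1],
-- 	[0, 1],
-- 	[-1, 0],
-- 	[1, 0]
-- ]
--
-- def map_mark_dfs(map, i, j):
-- 	if map[i][j][0] == WALL or map[i][j][0] == MARK:
-- 		return []
--
-- 	positions = [(i, j)]
--
-- 	map[i][j] = (MARK, SIMPLE_COLOR)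
-- 	for d in DIRECTIONS:
-- 	# walls on all sides, then no check needed there
-- 		new_positions = map_mark_dfs(map, i + d[0], j + d[1])
-- 		for pos in new_positions:
-- 		   	positions.append(pos)
--
-- 	return positions
--
-- def generate_doors(map):
-- 	doors = []
-- 	tmp_map = copy.deepcopy(map)
--
-- 	for i in range(len(tmp_map)):
-- 		for j in range(len(tmp_map[i])):
-- 			if tmp_map[i][j][0] == EMPTY:
-- 				map_mark_dfs(tmp_map, i, j)
-- 				map[i][j] = [DOOR, DOOR_COLOR]
-- 				doors.append([i, j])
--
-- 	return doors
-- ===== SOURCE B (Python) =====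
-- EMPTY = ' '
-- DOOR = '>'
-- MARK = '!'
-- WALL = '#'
-- SIMPLE_COLOR = 1
-- DOOR_COLOR = 8
-- DIRECTIONS = [
--     [0, -1],
--     [0, 1],
--     [-1, 0],
--     [1, 0]
-- ]
--
-- def generate_doors(map):
--     # No deepcopy: instead of mutating a scratch grid, remember visited cells
--     # in a set and flood-fill each empty region iteratively with a stack.
--     doors = []
--     marked = set()
--     for i, row in enumerate(map):
--         for j, cell in enumerate(row):
--             if cell[0] == EMPTY and (i, j) not in marked:
--                 stack = [(i, j)]
--                 while stack:
--                     x, y = stack.pop()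
--                     if (x, y) in marked:
--                         continue
--                     c = map[x][y][0]
--                     if c == WALL or c == MARK:
--                         continue
--                     marked.add((x, y))
--                     for dx, dy in reversed(DIRECTIONS):
--                         stack.append((x + dx, y + dy))
--                 map[i][j] = [DOOR, DOOR_COLOR]
--                 doors.append([i, j])
--     return doors
-- ===== Notes on version B (the rewrite author's own statement) =====
-- stated objective: faster
-- what changed: The deepcopy-and-mutate recursive DFS (which also rebuilds per-call position lists while bubbling them up the recursion) is replaced by an iterative stack flood fill that maintains a single shared set of visited coordinates, with no grid copy and no position-list accumulation.
-- outside the precondition, e.g. on generate_doors([[(' ', 7), ('#', 7)], [(' ', 7), (' ', 0)]]): A returns [[0, 0]], B raises IndexError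
import Mathlib
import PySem

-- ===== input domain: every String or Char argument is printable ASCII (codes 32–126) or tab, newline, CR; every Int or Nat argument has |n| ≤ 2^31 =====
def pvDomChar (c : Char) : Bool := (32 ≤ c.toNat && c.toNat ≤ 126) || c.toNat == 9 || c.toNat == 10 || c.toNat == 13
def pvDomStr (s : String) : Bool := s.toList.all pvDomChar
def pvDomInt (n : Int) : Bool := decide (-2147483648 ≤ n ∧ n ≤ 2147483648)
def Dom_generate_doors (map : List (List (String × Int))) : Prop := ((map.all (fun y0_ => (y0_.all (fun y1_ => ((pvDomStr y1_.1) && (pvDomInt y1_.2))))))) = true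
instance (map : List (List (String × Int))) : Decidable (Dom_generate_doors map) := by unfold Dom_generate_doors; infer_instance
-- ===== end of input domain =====

-- B drops the deepcopy and the recursive, position-list-building DFS: it flood-fills each empty
-- region iteratively with an explicit stack and one shared visited set of coordinates.
-- Equivalence is about the RETURN value only: in Python both A and B also write the doors into the caller's `map` in place.

-- ===== PORT A =====
-- cell read map[i][j] (Python indexing; `none` = IndexError, which Pre_ excludes)
def pvCell? (m : List (List (String × Int))) (i j : Int) : Option (String × Int) :=
  (PySem.List.pyGet? m i).bind fun row => PySem.List.pyGet? row j

-- cell write map[i][j] = v (in-range by Pre_; out of range would be Python IndexError)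
def pvSet (m : List (List (String × Int))) (i j : Int) (v : String × Int) : List (List (String × Int)) :=
  match PySem.List.pyGet? m i with
  | none => m
  | some row => PySem.List.pySetD m i (PySem.List.pySetD row j v)

def pvDirections : List (Int × Int) := [(0, -1), (0, 1), (-1, 0), (1, 0)]

-- total cell count; used only to compute a sufficient fuel for the recursion below
def pvCells (m : List (List (String × Int))) : Nat := m.foldl (fun a r => a + r.length) 0

-- A's recursive DFS; fuel bounds the recursion DEPTH (each nested call marks a fresh cell,
-- so depth ≤ #cells + 1: the fuel passed at the call site below never runs out inside Pre_)
def map_mark_dfs (fuel : Nat) (m : List (List (String × Int))) (i j : Int) :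
    List (List (String × Int)) × List (Int × Int) :=
  match fuel with
  | 0 => (m, [])
  | f + 1 =>
    match pvCell? m i j with
    | none => (m, [])  -- Python: IndexError here; excluded by Pre_
    | some c =>
      if c.1 = "#" ∨ c.1 = "!" then (m, [])
      else
        pvDirections.foldl
          (fun st d =>
            let r := map_mark_dfs f st.1 (i + d.1) (j + d.2)
            (r.1, st.2 ++ r.2))
          (pvSet m i j ("!", 1), [(i, j)])

def generate_doors (map : List (List (String × Int))) : List (List Int) :=
  -- tmp_map = deepcopy(map); doors accumulated alongside it
  ((PySem.List.pyRange 0 (map.length) 1).foldl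
    (fun (st : List (List (String × Int)) × List (List Int)) i =>
      (PySem.List.pyRange 0 (((PySem.List.pyGet? st.1 i).getD []).length) 1).foldl
        (fun st j =>
          match pvCell? st.1 i j with
          | none => st  -- unreachable: i, j come from range(len(...))
          | some c =>
            if c.1 = " " then
              ((map_mark_dfs (pvCells st.1 + 1) st.1 i j).1, st.2 ++ [[i, j]])
            else st)
        st)
    (map, ([] : List (List Int)))).2

-- ===== PORT B =====
def pvDirs : List (Int × Int) := [(0, -1), (0, 1), (-1, 0), (1, 0)]

-- len(map[0]) * … total number of cells; only sizes the fuel of the while-loop below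
def pvArea (m : List (List (String × Int))) : Nat := (m.map List.length).sum

-- map[x][y][0] with Python indexing (`none` = IndexError, excluded by Pre_)
def pvAt? (m : List (List (String × Int))) (x y : Int) : Option String :=
  (PySem.List.pyGet? m x).bind fun r => (PySem.List.pyGet? r y).map (fun c => c.1)

-- B's while-loop: pop, skip visited/blocked, mark, push the four neighbours.
-- The Lean list is the Python stack read from the top; fuel bounds the number of pops
-- (≤ 1 + 4·#cells inside Pre_, so the fuel passed below never runs out)
def pvFillS (fuel : Nat) (m : List (List (String × Int))) (marked : List (Int × Int))
    (stack : List (Int × Int)) : List (Int × Int) :=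
  match stack with
  | [] => marked
  | (x, y) :: rest =>
    match fuel with
    | 0 => marked
    | f + 1 =>
      if marked.contains (x, y) then pvFillS f m marked rest
      else
        match pvAt? m x y with
        | none => pvFillS f m marked rest  -- Python: IndexError here; excluded by Pre_
        | some c =>
          if c = "#" ∨ c = "!" then pvFillS f m marked rest
          else
            pvFillS f m (PySem.Set.add marked (x, y))
              (pvDirs.reverse.foldl (fun st d => (x + d.1, y + d.2) :: st) rest)

-- B never mutates `map` before reading it (door cells are always in `marked` first),
-- so every map[x][y] read below is a read of the original map.
def generate_doors_alt (map : List (List (String × Int))) : List (List Int) :=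
  ((PySem.List.enumerate map 0).foldl
    (fun (st : List (Int × Int) × List (List Int)) ir =>
      (PySem.List.enumerate ir.2 0).foldl
        (fun st jc =>
          if jc.2.1 = " " ∧ st.1.contains (ir.1, jc.1) = false then
            (pvFillS (4 * pvArea map + 2) map st.1 [(ir.1, jc.1)], st.2 ++ [[ir.1, jc.1]])
          else st)
        st)
    (([] : List (Int × Int)), ([] : List (List Int)))).2

-- ===== PRECONDITION & SPEC =====
def pvWallRow (r : List (String × Int)) : Bool := r.all (fun c => c.1 == "#")
-- rectangular and fully wall-bordered (the game invariant A's own comment assumes: "walls on all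
-- sides, then no check needed there"); under it the un-bounds-checked fill never leaves the grid
def pvBorderSafe (m : List (List (String × Int))) : Bool :=
  (m.all (fun r => r.length == (m.headD []).length)) &&
  (m.head?.all pvWallRow) && (m.getLast?.all pvWallRow) &&
  (m.all (fun r => r.head?.all (fun c => c.1 == "#") && r.getLast?.all (fun c => c.1 == "#")))
-- Pre_ excludes maps that contain an EMPTY cell but are ragged or not wall-bordered: there A's
-- unchecked indexing raises IndexError or wraps around at index -1, an accident of Python indexing
-- (on such wrap-around inputs A may return while B's visited set keeps walking and hits IndexError).
def Pre_generate_doors (map : List (List (String × Int))) : Prop :=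
  (map.all (fun r => r.all (fun c => c.1 != " ")) || pvBorderSafe map) = true
instance (map : List (List (String × Int))) : Decidable (Pre_generate_doors map) := by
  unfold Pre_generate_doors; infer_instance

def pvWitness_generate_doors : (List (List (String × Int))) :=
  [[("#", 0), ("#", 0), ("#", 0)],
   [("#", 0), (" ", 0), ("#", 0)],
   [("#", 0), ("#", 0), ("#", 0)]]

def Spec_generate_doors (map : List (List (String × Int))) (out : List (List Int)) : Prop := out = generate_doors_alt map
instance (map : List (List (String × Int))) (out : List (List Int)) : Decidable (Spec_generate_doors map out) := by unfold Spec_generate_doors; infer_instance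

-- ===== CLAIM (what is proved, stated in full; the proofs are below) =====
def Claim_equal_generate_doors : Prop := ∀ (map : List (List (String × Int))), Dom_generate_doors map → Pre_generate_doors map → Spec_generate_doors map (generate_doors map)

-- ===== LEMMAS AND PROOFS =====

-- proof-only intermediate: A's recursive DFS rephrased as a GRID-mutating stack fill
def pvFill (fuel : Nat) (m : List (List (String × Int))) (stack : List (Int × Int)) :
    List (List (String × Int)) :=
  match stack with
  | [] => m
  | (x, y) :: rest =>
    match fuel with
    | 0 => m
    | f + 1 =>
      match pvCell? m x y with
      | none => pvFill f m rest
      | some c =>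
        if c.1 = "#" ∨ c.1 = "!" then pvFill f m rest
        else
          pvFill f (pvSet m x y ("!", 1))
            (pvDirections.reverse.foldl (fun st d => (x + d.1, y + d.2) :: st) rest)

def pvOpen (c : String × Int) : Bool := !(c.1 == "#" || c.1 == "!")
def pvMu (m : List (List (String × Int))) : Nat :=
  (m.map (fun r => (r.filter pvOpen).length)).sum
theorem pv_idx_norm {α : Type} (xs : List α) (i : Int) (x v : α)
    (h : PySem.List.pyGet? xs i = some x) :
    ∃ k, k < xs.length ∧ xs[k]? = some x ∧ PySem.List.pySetD xs i v = xs.set k v := by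
  unfold PySem.List.pyGet? at h
  cases hk : PySem.List.pyIdx? xs.length i with
  | none => simp [hk] at h
  | some k =>
    refine ⟨k, ?_, ?_, ?_⟩
    · rw [hk] at h; simp at h; exact (List.getElem?_eq_some_iff.mp h).1
    · rw [hk] at h; simpa using h
    · simp [PySem.List.pySetD, PySem.List.pySet?, hk]
theorem pv_countP_set {α : Type} (xs : List α) (k : Nat) (v x : α) (p : α → Bool) (hget : xs[k]? = some x)
    (hx : p x = true) (hv : p v = false) :
    ((xs.set k v).filter p).length + 1 = (xs.filter p).length := by
  have hk : k < xs.length := (List.getElem?_eq_some_iff.mp hget).1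
  have hxe : xs[k] = x := (List.getElem?_eq_some_iff.mp hget).2
  have hdecomp : xs = xs.take k ++ xs[k] :: xs.drop (k+1) := by
    rw [List.getElem_cons_drop, List.take_append_drop]
  rw [List.set_eq_take_append_cons_drop, if_pos hk]
  conv_rhs => rw [hdecomp]
  simp [List.filter_append, hxe, hx, hv]
  omega
theorem pv_sum_map_set {α : Type} (m : List α) (k : Nat) (x v : α) (f : α → Nat) (hget : m[k]? = some x) :
    ((m.set k v).map f).sum + f x = (m.map f).sum + f v := by
  have hk : k < m.length := (List.getElem?_eq_some_iff.mp hget).1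
  have hxe : m[k] = x := (List.getElem?_eq_some_iff.mp hget).2
  have hdecomp : m = m.take k ++ m[k] :: m.drop (k+1) := by
    rw [List.getElem_cons_drop, List.take_append_drop]
  rw [List.set_eq_take_append_cons_drop, if_pos hk]
  conv_rhs => rw [hdecomp]
  simp [hxe]
  omega
theorem pv_mu_set (m : List (List (String × Int))) (i j : Int) (c : String × Int)
    (hc : pvCell? m i j = some c) (hopen : ¬(c.1 = "#" ∨ c.1 = "!")) :
    pvMu (pvSet m i j ("!", 1)) + 1 = pvMu m := by
  unfold pvCell? at hc
  cases hrow : PySem.List.pyGet? m i with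
  | none => rw [hrow] at hc; simp at hc
  | some row =>
    rw [hrow] at hc; simp at hc
    obtain ⟨kj, -, hgetj, hsetj⟩ := pv_idx_norm row j c ("!", (1:Int)) hc
    obtain ⟨ki, -, hgeti, hseti⟩ := pv_idx_norm m i row (PySem.List.pySetD row j ("!", 1)) hrow
    unfold pvSet
    rw [hrow]
    change pvMu (PySem.List.pySetD m i (PySem.List.pySetD row j ("!", 1))) + 1 = pvMu m
    rw [hseti, hsetj]
    have hx : pvOpen c = true := by
      rcases not_or.mp hopen with ⟨h1, h2⟩
      simp [pvOpen, h1, h2]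
    have hsum := pv_sum_map_set m ki row (row.set kj ("!", 1))
      (fun r => (r.filter pvOpen).length) hgeti
    have hcnt := pv_countP_set row kj ("!", (1:Int)) c pvOpen hgetj hx (by decide)
    unfold pvMu
    simp only at hsum
    omega

theorem pv_mu_dfs (f : Nat) : ∀ (m : List (List (String × Int))) (i j : Int),
    pvMu (map_mark_dfs f m i j).1 ≤ pvMu m := by
  induction f with
  | zero => intro m i j; simp [map_mark_dfs]
  | succ f ih =>
    intro m i j
    rw [map_mark_dfs]
    cases hc : pvCell? m i j with
    | none => simp
    | some c =>
      by_cases hb : c.1 = "#" ∨ c.1 = "!"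
      · simp [hb]
      · simp only [if_neg hb, pvDirections, List.foldl]
        have h0 := pv_mu_set m i j c hc hb
        exact le_trans (ih _ _ _) (le_trans (ih _ _ _)
          (le_trans (ih _ _ _) (le_trans (ih _ _ _) (by omega))))

theorem pv_fill_fuel (f : Nat) : ∀ (g : Nat) (m : List (List (String × Int))) (s : List (Int × Int)),
    4 * pvMu m + s.length < f → 4 * pvMu m + s.length < g → pvFill f m s = pvFill g m s := by
  induction f with
  | zero => intro g m s h1 h2; omega
  | succ f ih =>
    intro g m s h1 h2
    cases s with
    | nil => simp [pvFill]
    | cons xy rest =>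
      obtain ⟨x, y⟩ := xy
      obtain ⟨g', rfl⟩ : ∃ g', g = g' + 1 := ⟨g - 1, by simp at h2; omega⟩
      rw [pvFill, pvFill]
      cases hc : pvCell? m x y with
      | none => exact ih g' m rest (by simp at h1 ⊢; omega) (by simp at h2 ⊢; omega)
      | some c =>
        by_cases hb : c.1 = "#" ∨ c.1 = "!"
        · simp only [if_pos hb]
          exact ih g' m rest (by simp at h1 ⊢; omega) (by simp at h2 ⊢; omega)
        · simp only [if_neg hb]
          have h0 := pv_mu_set m x y c hc hb
          apply ih <;> simp [pvDirections] <;> simp at h1 h2 <;> omega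

theorem pv_sim (n : Nat) : ∀ (m : List (List (String × Int))) (i j : Int) (s : List (Int × Int)) (f g d : Nat),
    pvMu m < n → 4 * pvMu m + s.length + 1 < f → 4 * pvMu m + s.length < g → pvMu m < d →
    pvFill f m ((i, j) :: s) = pvFill g (map_mark_dfs d m i j).1 s := by
  induction n with
  | zero => intro m i j s f g d h0 _ _ _; omega
  | succ n ih =>
    intro m i j s f g d hn hf hg hd
    obtain ⟨f', rfl⟩ : ∃ f', f = f' + 1 := ⟨f - 1, by omega⟩
    obtain ⟨d', rfl⟩ : ∃ d', d = d' + 1 := ⟨d - 1, by omega⟩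
    rw [map_mark_dfs, pvFill]
    cases hc : pvCell? m i j with
    | none => exact pv_fill_fuel f' g m s (by omega) (by omega)
    | some c =>
      by_cases hb : c.1 = "#" ∨ c.1 = "!"
      · simp only [if_pos hb]
        exact pv_fill_fuel f' g m s (by omega) (by omega)
      · simp only [if_neg hb]
        have h0 := pv_mu_set m i j c hc hb
        simp only [pvDirections, List.reverse, List.foldl, List.reverseAux]
        have hmu2 : pvMu (pvSet m i j ("!", 1)) ≤ n := by omega
        have e1 := ih (pvSet m i j ("!", 1)) (i + 0) (j + (-1))
          ((i + 0, j + 1) :: (i + (-1), j + 0) :: (i + 1, j + 0) :: s) f' f' d'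
          (by omega) (by simp only [List.length_cons]; omega) (by simp only [List.length_cons]; omega) (by omega)
        rw [e1]
        have hm3 := pv_mu_dfs d' (pvSet m i j ("!", 1)) (i + 0) (j + (-1))
        have e2 := ih (map_mark_dfs d' (pvSet m i j ("!", 1)) (i + 0) (j + (-1))).1
          (i + 0) (j + 1) ((i + (-1), j + 0) :: (i + 1, j + 0) :: s) f' f' d'
          (by omega) (by simp only [List.length_cons]; omega) (by simp only [List.length_cons]; omega) (by omega)
        rw [e2]
        have hm4 := pv_mu_dfs d' (map_mark_dfs d' (pvSet m i j ("!", 1)) (i + 0) (j + (-1))).1 (i + 0) (j + 1)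
        have e3 := ih (map_mark_dfs d' (map_mark_dfs d' (pvSet m i j ("!", 1)) (i + 0) (j + (-1))).1 (i + 0) (j + 1)).1
          (i + (-1)) (j + 0) ((i + 1, j + 0) :: s) f' f' d'
          (by omega) (by simp only [List.length_cons]; omega) (by simp only [List.length_cons]; omega) (by omega)
        rw [e3]
        have hm5 := pv_mu_dfs d' (map_mark_dfs d' (map_mark_dfs d' (pvSet m i j ("!", 1)) (i + 0) (j + (-1))).1 (i + 0) (j + 1)).1 (i + (-1)) (j + 0)
        have e4 := ih (map_mark_dfs d' (map_mark_dfs d' (map_mark_dfs d' (pvSet m i j ("!", 1)) (i + 0) (j + (-1))).1 (i + 0) (j + 1)).1 (i + (-1)) (j + 0)).1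
          (i + 1) (j + 0) s f' g d'
          (by omega) (by omega) (by omega) (by omega)
        rw [e4]

theorem pv_mu_le_cells (m : List (List (String × Int))) : pvMu m ≤ pvCells m := by
  have h : ∀ (a : Nat), m.foldl (fun a r => a + r.length) a = a + (m.map List.length).sum := by
    induction m with
    | nil => simp
    | cons r t iht => intro a; simp [List.foldl, iht]; omega
  unfold pvCells pvMu
  rw [h 0]
  simp only [Nat.zero_add]
  clear h
  induction m with
  | nil => simp
  | cons r t iht =>
    simp only [List.map_cons, List.sum_cons]
    have := List.length_filter_le pvOpen r
    omega

theorem pv_key (t : List (List (String × Int))) (i j : Int) :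
    (map_mark_dfs (pvCells t + 1) t i j).1 = pvFill (4 * pvCells t + 2) t [(i, j)] := by
  have hc := pv_mu_le_cells t
  have h := pv_sim (pvMu t + 1) t i j [] (4 * pvCells t + 2) (4 * pvMu t + 1) (pvCells t + 1)
    (by omega) (by simp only [List.length_nil]; omega) (by simp only [List.length_nil]; omega) (by omega)
  rw [h, pvFill]

-- ------- grid-fill ↔ set-fill simulation -------

def pvRow (m : List (List (String × Int))) (k : Nat) : List (String × Int) := m.getD k []
def pvVal (m : List (List (String × Int))) (k l : Nat) : String × Int := (pvRow m k).getD l ("", 0)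

-- t (A's mutated scratch grid) = m (the original map) overlaid with marks at the cells of S
def pvRel (m : List (List (String × Int))) (S : List (Int × Int)) (t : List (List (String × Int))) : Prop :=
  t.length = m.length ∧
  (∀ k : Nat, (pvRow t k).length = (pvRow m k).length) ∧
  (∀ k l : Nat, k < m.length → l < (pvRow m k).length →
    pvVal t k l = if S.contains ((k : Int), (l : Int)) then ("!", (1 : Int)) else pvVal m k l)

-- all stack positions are in-range, canonically (non-negatively) indexed
def pvCanS (m : List (List (String × Int))) (stack : List (Int × Int)) : Prop :=
  ∀ p ∈ stack, ∃ k l : Nat, p = ((k : Int), (l : Int)) ∧ k < m.length ∧ l < (pvRow m k).length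

theorem pv_cell_canon (m : List (List (String × Int))) (k l : Nat)
    (hk : k < m.length) (hl : l < (pvRow m k).length) :
    pvCell? m ((k : Int)) ((l : Int)) = some (pvVal m k l) := by
  unfold pvCell? pvVal pvRow at *
  have h1 : m[k]? = some m[k] := List.getElem?_eq_some_iff.mpr ⟨hk, rfl⟩
  simp [PySem.List.pyGet?_natCast, h1, List.getD, List.getElem?_eq_some_iff] at *
  exact ⟨hl, by simp [List.getElem?_eq_getElem hl]⟩

theorem pv_at_canon (m : List (List (String × Int))) (k l : Nat)
    (hk : k < m.length) (hl : l < (pvRow m k).length) :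
    pvAt? m ((k : Int)) ((l : Int)) = some (pvVal m k l).1 := by
  unfold pvAt? pvVal pvRow at *
  have h1 : m[k]? = some m[k] := List.getElem?_eq_some_iff.mpr ⟨hk, rfl⟩
  simp [PySem.List.pyGet?_natCast, h1, List.getD, List.getElem?_eq_some_iff] at *
  exact ⟨hl, by simp [List.getElem?_eq_getElem hl]⟩

def pvStRel (m : List (List (String × Int)))
    (stA : List (List (String × Int)) × List (List Int))
    (stB : List (Int × Int) × List (List Int)) : Prop :=
  pvRel m stB.1 stA.1 ∧ stA.2 = stB.2

theorem pv_getD_set {α : Type} (l : List α) (i j : Nat) (a d : α) :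
    (l.set i a).getD j d = if i = j ∧ i < l.length then a else l.getD j d := by
  by_cases hij : i = j
  · subst hij
    by_cases hi : i < l.length
    · simp [List.getD, hi]
    · simp [List.getD, List.set_eq_of_length_le (Nat.le_of_not_lt hi), hi]
  · simp [List.getD, List.getElem?_set_ne hij, hij]

theorem pv_rel_update (m : List (List (String × Int))) (S : List (Int × Int))
    (t : List (List (String × Int))) (k l : Nat)
    (hrel : pvRel m S t) (hk : k < m.length) (hl : l < (pvRow m k).length) :
    pvRel m (S ++ [((k : Int), (l : Int))]) (pvSet t ((k : Int)) ((l : Int)) ("!", 1)) := by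
  obtain ⟨hlen, hrows, hcells⟩ := hrel
  simp only [pvRel, pvVal, pvRow] at *
  have hkt : k < t.length := by rw [hlen]; exact hk
  have htk : t.getD k [] = t[k] := List.getD_eq_getElem _ _ hkt
  have hlt : l < t[k].length := by rw [← htk, hrows k]; exact hl
  have hry : PySem.List.pyGet? t ((k : Int)) = some t[k] := by
    simp [List.getElem?_eq_getElem hkt]
  unfold pvSet
  rw [hry]
  simp only [PySem.List.pySetD_natCast]
  refine ⟨by simpa using hlen, ?_, ?_⟩
  · intro k'
    rw [pv_getD_set]
    by_cases h : k = k' ∧ k < t.length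
    · rw [if_pos h]
      obtain ⟨rfl, -⟩ := h
      have h2 := hrows k
      rw [htk] at h2
      simpa using h2
    · rw [if_neg h]; exact hrows k'
  · intro k' l' hk' hl'
    rw [pv_getD_set]
    by_cases hkk : k = k'
    · subst hkk
      rw [if_pos ⟨rfl, hkt⟩, pv_getD_set]
      by_cases hll : l = l'
      · subst hll
        rw [if_pos ⟨rfl, hlt⟩]
        simp
      · rw [if_neg (by rintro ⟨h1, -⟩; exact hll h1)]
        have hcon : (S ++ [((k : Int), (l : Int))]).contains ((k : Int), (l' : Int))
            = S.contains ((k : Int), (l' : Int)) := by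
          simp [Prod.ext_iff]; omega
        rw [hcon, ← htk]
        exact hcells k l' hk' hl'
    · rw [if_neg (by rintro ⟨h1, -⟩; exact hkk h1)]
      have hcon : (S ++ [((k : Int), (l : Int))]).contains ((k' : Int), (l' : Int))
          = S.contains ((k' : Int), (l' : Int)) := by
        simp [Prod.ext_iff]; omega
      rw [hcon]
      exact hcells k' l' hk' hl'

theorem pv_border_interior (m : List (List (String × Int))) (hb : pvBorderSafe m = true)
    (k l : Nat) (hk : k < m.length) (hl : l < (pvRow m k).length)
    (hw : ¬ (pvVal m k l).1 = "#") :
    1 ≤ k ∧ k + 1 < m.length ∧ 1 ≤ l ∧ l + 1 < (pvRow m k).length ∧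
    (∀ k' : Nat, k' < m.length → (pvRow m k').length = (pvRow m k).length) := by
  simp only [pvVal, pvRow] at *
  unfold pvBorderSafe at hb
  simp only [Bool.and_eq_true, List.all_eq_true, beq_iff_eq] at hb
  obtain ⟨⟨⟨hrect, hhead⟩, hlast⟩, hsides⟩ := hb
  have hmk : m.getD k [] = m[k] := List.getD_eq_getElem _ _ hk
  have hmem : m[k] ∈ m := List.getElem_mem hk
  have hl' : l < m[k].length := by rw [← hmk]; exact hl
  have hcellv : (m.getD k []).getD l ("", 0) = m[k][l] := by
    rw [hmk]; exact List.getD_eq_getElem _ _ hl'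
  rw [hcellv] at hw
  have hcellmem : m[k][l] ∈ m[k] := List.getElem_mem hl'
  have huni : ∀ k' : Nat, k' < m.length → (m.getD k' []).length = (m.getD k []).length := by
    intro k' hk'
    rw [List.getD_eq_getElem _ _ hk', hmk, hrect _ (List.getElem_mem hk'), hrect _ hmem]
  have hk1 : 1 ≤ k := by
    rcases Nat.eq_zero_or_pos k with rfl | h
    · exfalso
      have hh : m.head? = some m[0] := by
        rw [List.head?_eq_getElem?]; exact List.getElem?_eq_getElem hk
      rw [hh] at hhead
      simp only [Option.all_some] at hhead
      unfold pvWallRow at hhead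
      simp only [List.all_eq_true, beq_iff_eq] at hhead
      exact hw (hhead _ hcellmem)
    · exact h
  have hk2 : k + 1 < m.length := by
    rcases Nat.lt_or_ge (k + 1) m.length with h | h
    · exact h
    · exfalso
      have hke : k = m.length - 1 := by omega
      have hh : m.getLast? = some m[k] := by
        rw [List.getLast?_eq_getElem?, ← hke]
        exact List.getElem?_eq_getElem hk
      rw [hh] at hlast
      simp only [Option.all_some] at hlast
      unfold pvWallRow at hlast
      simp only [List.all_eq_true, beq_iff_eq] at hlast
      exact hw (hlast _ hcellmem)
  obtain ⟨hleft, hright⟩ := hsides _ hmem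
  have hl1 : 1 ≤ l := by
    rcases Nat.eq_zero_or_pos l with rfl | h
    · exfalso
      have hh : m[k].head? = some m[k][0] := by
        rw [List.head?_eq_getElem?]; exact List.getElem?_eq_getElem hl'
      rw [hh] at hleft
      simp only [Option.all_some, beq_iff_eq] at hleft
      exact hw hleft
    · exact h
  have hl2 : l + 1 < m[k].length := by
    rcases Nat.lt_or_ge (l + 1) m[k].length with h | h
    · exact h
    · exfalso
      have hle : l = m[k].length - 1 := by omega
      have hh : m[k].getLast? = some m[k][l] := by
        rw [List.getLast?_eq_getElem?, ← hle]
        exact List.getElem?_eq_getElem hl'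
      rw [hh] at hright
      simp only [Option.all_some, beq_iff_eq] at hright
      exact hw hright
  exact ⟨hk1, hk2, hl1, by rw [hmk]; exact hl2, huni⟩

theorem pv_cells_eq_area (m : List (List (String × Int))) (S : List (Int × Int))
    (t : List (List (String × Int))) (hrel : pvRel m S t) : pvCells t = pvArea m := by
  have hfold : ∀ (u : List (List (String × Int))) (a : Nat),
      u.foldl (fun a r => a + r.length) a = a + (u.map List.length).sum := by
    intro u
    induction u with
    | nil => simp
    | cons r v ihv => intro a; simp [List.foldl, ihv]; omega
  unfold pvCells pvArea
  rw [hfold]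
  simp only [Nat.zero_add]
  have hmap : t.map List.length = m.map List.length := by
    apply List.ext_getElem
    · simp [hrel.1]
    · intro k h1 h2
      simp only [List.getElem_map]
      have h := hrel.2.1 k
      simp only [pvRow] at h
      rw [List.getD_eq_getElem _ _ (by simpa using h1), List.getD_eq_getElem _ _ (by simpa using h2)] at h
      exact h
  rw [hmap]

theorem pv_fill_sim (m : List (List (String × Int))) (hb : pvBorderSafe m = true) :
    ∀ (f : Nat) (t : List (List (String × Int))) (S stack : List (Int × Int)),
      pvRel m S t → pvCanS m stack →
      pvRel m (pvFillS f m S stack) (pvFill f t stack) := by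
  intro f
  induction f with
  | zero =>
    intro t S stack hrel hcan
    cases stack with
    | nil => simpa [pvFillS, pvFill] using hrel
    | cons p rest =>
      obtain ⟨x, y⟩ := p
      simpa [pvFillS, pvFill] using hrel
  | succ f ih =>
    intro t S stack hrel hcan
    cases stack with
    | nil => simpa [pvFillS, pvFill] using hrel
    | cons p rest =>
      obtain ⟨x, y⟩ := p
      obtain ⟨k, l, hp, hk, hl⟩ := hcan (x, y) (by simp)
      have hx : x = (k : Int) := congrArg Prod.fst hp
      have hy : y = (l : Int) := congrArg Prod.snd hp
      subst hx; subst hy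
      have hcan' : pvCanS m rest := fun q hq => hcan q (List.mem_cons_of_mem _ hq)
      have hkt : k < t.length := by rw [hrel.1]; exact hk
      have hlt : l < (pvRow t k).length := by rw [hrel.2.1 k]; exact hl
      simp only [pvFillS, pvFill, pv_cell_canon t k l hkt hlt, pv_at_canon m k l hk hl]
      rw [hrel.2.2 k l hk hl]
      by_cases hc : ((k : Int), (l : Int)) ∈ S
      · simpa [hc] using ih t S rest hrel hcan'
      · have hc' : S.contains ((k : Int), (l : Int)) = false := by
          simpa [List.contains_iff_mem] using hc
        by_cases hblk : (pvVal m k l).1 = "#" ∨ (pvVal m k l).1 = "!"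
        · simpa [hc, hblk] using ih t S rest hrel hcan'
        · obtain ⟨hi1, hi2, hi3, hi4, huni⟩ :=
            pv_border_interior m hb k l hk hl (fun h => hblk (Or.inl h))
          have hrel' := pv_rel_update m S t k l hrel hk hl
          have hcan2 : pvCanS m (((k : Int), (l : Int) + -1) :: ((k : Int), (l : Int) + 1)
              :: ((k : Int) + -1, (l : Int)) :: ((k : Int) + 1, (l : Int)) :: rest) := by
            intro q hq
            simp only [List.mem_cons] at hq
            rcases hq with rfl | rfl | rfl | rfl | hq
            · exact ⟨k, l - 1, by simp [Prod.ext_iff]; omega, hk, by omega⟩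
            · exact ⟨k, l + 1, by simp, hk, by omega⟩
            · exact ⟨k - 1, l, by simp [Prod.ext_iff]; omega, by omega,
                by rw [huni (k - 1) (by omega)]; omega⟩
            · exact ⟨k + 1, l, by simp, hi2,
                by rw [huni (k + 1) hi2]; omega⟩
            · exact hcan' q hq
          have hres := ih (pvSet t ((k : Int)) ((l : Int)) ("!", 1))
            (S ++ [((k : Int), (l : Int))]) _ hrel' hcan2
          simpa [hc, hc', hblk, PySem.Set.add, pvDirections, pvDirs] using hres

-- the two inner-loop bodies, named for the congruence proofs below
def pvABody (i : Int) (st : List (List (String × Int)) × List (List Int)) (j : Int) :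
    List (List (String × Int)) × List (List Int) :=
  match pvCell? st.1 i j with
  | none => st
  | some c =>
    if c.1 = " " then
      ((map_mark_dfs (pvCells st.1 + 1) st.1 i j).1, st.2 ++ [[i, j]])
    else st

def pvBBody (m : List (List (String × Int))) (i : Int)
    (st : List (Int × Int) × List (List Int)) (jc : Int × (String × Int)) :
    List (Int × Int) × List (List Int) :=
  if jc.2.1 = " " ∧ st.1.contains (i, jc.1) = false then
    (pvFillS (4 * pvArea m + 2) m st.1 [(i, jc.1)], st.2 ++ [[i, jc.1]])
  else st

theorem pv_inner (m : List (List (String × Int)))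
    (Hb : pvBorderSafe m = true ∨ ∀ r ∈ m, ∀ c ∈ r, ¬ c.1 = " ")
    (i : Nat) (hi : i < m.length) :
    ∀ (cells : List (String × Int)) (j0 : Nat)
      (stA : List (List (String × Int)) × List (List Int))
      (stB : List (Int × Int) × List (List Int)),
      pvStRel m stA stB → cells = (pvRow m i).drop j0 →
      pvStRel m
        ((PySem.List.pyRange ((j0 : Int)) (((pvRow m i).length : Int)) 1).foldl (pvABody ((i : Int))) stA)
        ((PySem.List.enumerate cells ((j0 : Int))).foldl (pvBBody m ((i : Int))) stB) := by
  intro cells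
  induction cells with
  | nil =>
    intro j0 stA stB hst hdrop
    have hle : (pvRow m i).length ≤ j0 := List.drop_eq_nil_iff.mp hdrop.symm
    rw [PySem.List.pyRange_one_eq_nil (by exact_mod_cast hle), PySem.List.enumerate_nil]
    simpa using hst
  | cons c cells' ihc =>
    intro j0 stA stB hst hdrop
    have hj0 : j0 < (pvRow m i).length := by
      by_contra h
      rw [List.drop_eq_nil_of_le (by omega)] at hdrop
      simp at hdrop
    have hc : (pvRow m i)[j0]? = some c := by
      have h0 := congrArg (fun l => l[0]?) hdrop
      simpa [List.getElem?_drop] using h0.symm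
    have hcv : pvVal m i j0 = c := by
      unfold pvVal
      simp [List.getD, hc]
    have hdrop' : cells' = (pvRow m i).drop (j0 + 1) := by
      have h1 := congrArg (List.drop 1) hdrop
      simpa [List.drop_drop] using h1
    obtain ⟨tA, dA⟩ := stA
    obtain ⟨S, dA⟩ := stB
    obtain ⟨hrel, hdoors⟩ := hst
    simp only at hrel hdoors
    subst hdoors
    rw [PySem.List.pyRange_one_cons (by exact_mod_cast hj0), PySem.List.enumerate_cons,
        List.foldl_cons, List.foldl_cons]
    have hkt : i < tA.length := by rw [hrel.1]; exact hi
    have hlt : j0 < (pvRow tA i).length := by rw [hrel.2.1 i]; exact hj0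
    have hcast : ((j0 : Int) + 1) = (((j0 + 1 : Nat)) : Int) := by push_cast; ring
    have hA : pvABody ((i : Int)) (tA, dA) ((j0 : Int))
        = if (pvVal tA i j0).1 = " "
          then ((map_mark_dfs (pvCells tA + 1) tA ((i : Int)) ((j0 : Int))).1,
                dA ++ [[(i : Int), (j0 : Int)]])
          else (tA, dA) := by
      unfold pvABody
      rw [pv_cell_canon tA i j0 hkt hlt]
    have hval : pvVal tA i j0
        = if S.contains ((i : Int), (j0 : Int)) = true then ("!", 1) else pvVal m i j0 :=
      hrel.2.2 i j0 hi hj0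
    by_cases hcon : ((i : Int), (j0 : Int)) ∈ S
    · have hcont : S.contains ((i : Int), (j0 : Int)) = true := by
        simpa [List.contains_iff_mem] using hcon
      have hA' : pvABody ((i : Int)) (tA, dA) ((j0 : Int)) = (tA, dA) := by
        rw [hA, hval, hcont]; simp
      have hB' : pvBBody m ((i : Int)) (S, dA) ((j0 : Int), c) = (S, dA) := by
        unfold pvBBody; simp [hcon]
      rw [hA', hB', hcast]
      exact ihc (j0 + 1) (tA, dA) (S, dA) ⟨hrel, rfl⟩ hdrop'
    · have hcont : S.contains ((i : Int), (j0 : Int)) = false := by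
        simpa [List.contains_iff_mem] using hcon
      by_cases hsp : c.1 = " "
      · have hbS : pvBorderSafe m = true := by
          rcases Hb with h | h
          · exact h
          · exfalso
            refine h (pvRow m i) ?_ c ?_ hsp
            · have hmi : pvRow m i = m[i] := List.getD_eq_getElem _ _ hi
              rw [hmi]; exact List.getElem_mem hi
            · exact List.mem_of_getElem? hc
        have harea : pvCells tA = pvArea m := pv_cells_eq_area m S tA hrel
        have hsim := pv_fill_sim m hbS (4 * pvArea m + 2) tA S [((i : Int), (j0 : Int))] hrel
          (fun q hq => by
            have hq' : q = ((i : Int), (j0 : Int)) := by simpa using hq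
            exact ⟨i, j0, hq', hi, hj0⟩)
        have hA' : pvABody ((i : Int)) (tA, dA) ((j0 : Int))
            = (pvFill (4 * pvArea m + 2) tA [((i : Int), (j0 : Int))],
               dA ++ [[(i : Int), (j0 : Int)]]) := by
          rw [hA, hval, hcont, pv_key, harea]
          simp [hcv, hsp]
        have hB' : pvBBody m ((i : Int)) (S, dA) ((j0 : Int), c)
            = (pvFillS (4 * pvArea m + 2) m S [((i : Int), (j0 : Int))],
               dA ++ [[(i : Int), (j0 : Int)]]) := by
          unfold pvBBody; simp [hsp, hcon]
        rw [hA', hB', hcast]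
        exact ihc (j0 + 1) _ _ ⟨hsim, rfl⟩ hdrop'
      · have hA' : pvABody ((i : Int)) (tA, dA) ((j0 : Int)) = (tA, dA) := by
          rw [hA, hval, hcont]
          simp [hcv, hsp]
        have hB' : pvBBody m ((i : Int)) (S, dA) ((j0 : Int), c) = (S, dA) := by
          unfold pvBBody; simp [hsp]
        rw [hA', hB', hcast]
        exact ihc (j0 + 1) (tA, dA) (S, dA) ⟨hrel, rfl⟩ hdrop'

theorem pv_outer (m : List (List (String × Int)))
    (Hb : pvBorderSafe m = true ∨ ∀ r ∈ m, ∀ c ∈ r, ¬ c.1 = " ") :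
    ∀ (rows : List (List (String × Int))) (i0 : Nat)
      (stA : List (List (String × Int)) × List (List Int))
      (stB : List (Int × Int) × List (List Int)),
      pvStRel m stA stB → rows = m.drop i0 →
      pvStRel m
        ((PySem.List.pyRange ((i0 : Int)) ((m.length : Int)) 1).foldl
          (fun st i =>
            (PySem.List.pyRange 0 ((((PySem.List.pyGet? st.1 i).getD []).length : Int)) 1).foldl
              (pvABody i) st) stA)
        ((PySem.List.enumerate rows ((i0 : Int))).foldl
          (fun st ir => (PySem.List.enumerate ir.2 0).foldl (pvBBody m ir.1) st) stB) := by
  intro rows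
  induction rows with
  | nil =>
    intro i0 stA stB hst hdrop
    have hle : m.length ≤ i0 := List.drop_eq_nil_iff.mp hdrop.symm
    rw [PySem.List.pyRange_one_eq_nil (by exact_mod_cast hle), PySem.List.enumerate_nil]
    simpa using hst
  | cons r rows' ihr =>
    intro i0 stA stB hst hdrop
    have hi0 : i0 < m.length := by
      by_contra h
      rw [List.drop_eq_nil_of_le (by omega)] at hdrop
      simp at hdrop
    have hr : m[i0]? = some r := by
      have h0 := congrArg (fun l => l[0]?) hdrop
      simpa [List.getElem?_drop] using h0.symm
    have hrv : pvRow m i0 = r := by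
      unfold pvRow
      simp [List.getD, hr]
    have hdrop' : rows' = m.drop (i0 + 1) := by
      have h1 := congrArg (List.drop 1) hdrop
      simpa [List.drop_drop] using h1
    obtain ⟨tA, dA⟩ := stA
    obtain ⟨S, dA⟩ := stB
    obtain ⟨hrel, hdoors⟩ := hst
    simp only at hrel hdoors
    subst hdoors
    rw [PySem.List.pyRange_one_cons (by exact_mod_cast hi0), PySem.List.enumerate_cons,
        List.foldl_cons, List.foldl_cons]
    have hcast : ((i0 : Int) + 1) = (((i0 + 1 : Nat)) : Int) := by push_cast; ring
    have hlen0 : ((PySem.List.pyGet? tA ((i0 : Int))).getD []).length = (pvRow m i0).length := by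
      rw [PySem.List.pyGet?_natCast]
      exact hrel.2.1 i0
    have hinner := pv_inner m Hb i0 hi0 (pvRow m i0) 0 (tA, dA) (S, dA) ⟨hrel, rfl⟩ (by simp)
    rw [hcast]
    dsimp only
    rw [hlen0, ← hrv]
    exact ihr (i0 + 1) _ _ hinner hdrop'

-- ===== VERDICT (by name: the statement is the Claim_ definition above) =====
theorem generate_doors_spec : Claim_equal_generate_doors := by
  intro m _ hpre
  unfold Spec_generate_doors
  have Hb : pvBorderSafe m = true ∨ ∀ r ∈ m, ∀ c ∈ r, ¬ c.1 = " " := by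
    unfold Pre_generate_doors at hpre
    simp only [Bool.or_eq_true, List.all_eq_true, bne_iff_ne, ne_eq] at hpre
    rcases hpre with h | h
    · exact Or.inr h
    · exact Or.inl h
  have hinit : pvStRel m (m, ([] : List (List Int))) (([] : List (Int × Int)), []) :=
    ⟨⟨rfl, fun _ => rfl, fun k l _ _ => by simp⟩, rfl⟩
  have h := pv_outer m Hb m 0 (m, []) ([], []) hinit (by simp)
  exact h.2
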